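-- pv_equiv track=rewrite | github.com/RandomCodeSpace/asr | scripts/build_single_file.py | _split_imports_and_body
-- ===== SOURCE A (Python) =====
-- def _split_imports_and_body(src: str) -> tuple[list[str], str]:
--     """Return (top-of-file imports, rest).
--
--     Treats multi-line module docstrings as atomic — an opening ``\"\"\"`` on
--     one line keeps every subsequent line in *imports* until the closing
--     ``\"\"\"`` is seen, even if the body of the docstring contains lines that
--     don't otherwise look like imports. Without this, the opening triple-quote
--     landed in *imports* while the closing one fell through to *body*, leaving
--     the bundled file with an unterminated triple-quote and Python parsing the
--     rest of the world as one giant string.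
--     """
--     imports: list[str] = []
--     body_lines: list[str] = []
--     in_imports = True
--     in_docstring = False  # set True between an unmatched """ / ''' pair
--
--     def _odd_triple_quotes(s: str) -> bool:
--         return ((s.count('"""') + s.count("'''")) % 2) == 1
--
--     for line in src.splitlines():
--         if in_docstring:
--             # Inside a multi-line docstring — every line is import-zone until
--             # the matching triple-quote arrives.
--             imports.append(line)
--             if _odd_triple_quotes(line):
--                 in_docstring = False
--             continue
--         stripped = line.strip()
--         if in_imports:
--             opens_docstring = (stripped.startswith('"""')
--                                or stripped.startswith("'''"))
--             if (stripped.startswith("import ") or stripped.startswith("from ")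
--                     or stripped == "" or stripped.startswith("#")
--                     or opens_docstring):
--                 imports.append(line)
--                 # If the line has an odd number of triple-quotes, it leaves a
--                 # docstring open across the line boundary.
--                 if opens_docstring and _odd_triple_quotes(line):
--                     in_docstring = True
--             else:
--                 in_imports = False
--                 body_lines.append(line)
--         else:
--             body_lines.append(line)
--     return imports, "\n".join(body_lines)
-- ===== SOURCE B (Python) =====
-- def _split_imports_and_body(src: str) -> tuple[list[str], str]:
--     """Find the index of the first body line with a single stateful scan,
--     then slice: imports = lines[:i], body = "\n".join(lines[i:])."""
--     lines = src.splitlines()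
--     n = len(lines)
--     i = 0
--     in_docstring = False
--     while i < n:
--         line = lines[i]
--         if in_docstring:
--             if ((line.count('"""') + line.count("'''")) % 2) == 1:
--                 in_docstring = False
--             i += 1
--             continue
--         stripped = line.strip()
--         opens_docstring = stripped.startswith('"""') or stripped.startswith("'''")
--         if (stripped.startswith("import ") or stripped.startswith("from ")
--                 or stripped == "" or stripped.startswith("#") or opens_docstring):
--             if opens_docstring and ((line.count('"""') + line.count("'''")) % 2) == 1:
--                 in_docstring = True
--             i += 1
--         else:
--             break
--     return lines[:i], "\n".join(lines[i:])
-- ===== Notes on version B (the rewrite author's own statement) =====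
-- stated objective: alternative
-- what changed: B replaces A's two accumulator lists and in_imports flag by a single scan that only computes the boundary index of the first body line, then returns (lines[:i], '\n'.join(lines[i:])) by slicing.
import Mathlib
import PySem

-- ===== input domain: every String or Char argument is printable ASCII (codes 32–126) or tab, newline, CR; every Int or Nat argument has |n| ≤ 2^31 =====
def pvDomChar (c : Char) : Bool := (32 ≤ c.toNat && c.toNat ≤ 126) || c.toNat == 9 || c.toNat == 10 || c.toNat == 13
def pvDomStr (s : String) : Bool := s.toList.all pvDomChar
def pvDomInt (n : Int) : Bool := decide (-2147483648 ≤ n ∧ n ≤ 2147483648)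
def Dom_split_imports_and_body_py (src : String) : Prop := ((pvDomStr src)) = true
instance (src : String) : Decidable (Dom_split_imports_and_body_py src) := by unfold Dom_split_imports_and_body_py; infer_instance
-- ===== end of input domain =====

-- B computes only the boundary index of the first body line and slices, instead of A's two
-- accumulator lists with an in_imports flag: a different decomposition of the same scan (same cost).

-- ===== PORT A =====
-- _odd_triple_quotes(s)
def pyOddTriple (s : String) : Bool :=
  ((PySem.Str.count s "\"\"\"" + PySem.Str.count s "'''") % 2) == 1

-- the for-loop of A, state = (imports, body_lines, in_imports, in_docstring)
def aLoop : List String → List String → List String → Bool → Bool → List String × List String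
  | [], imports, body_lines, _, _ => (imports, body_lines)
  | line :: rest, imports, body_lines, in_imports, in_docstring =>
    if in_docstring then
      aLoop rest (imports ++ [line]) body_lines in_imports
        (if pyOddTriple line then false else in_docstring)
    else
      let stripped := PySem.Str.strip line
      if in_imports then
        let opens := PySem.Str.startswith stripped "\"\"\"" || PySem.Str.startswith stripped "'''"
        if PySem.Str.startswith stripped "import " || PySem.Str.startswith stripped "from "
            || stripped == "" || PySem.Str.startswith stripped "#" || opens then
          aLoop rest (imports ++ [line]) body_lines in_imports
            (if opens && pyOddTriple line then true else in_docstring)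
        else
          aLoop rest imports (body_lines ++ [line]) false in_docstring
      else
        aLoop rest imports (body_lines ++ [line]) in_imports in_docstring

def split_imports_and_body_py (src : String) : List String × String :=
  let r := aLoop (PySem.Str.splitlines src) [] [] true false
  (r.1, PySem.Str.join "\n" r.2)

-- ===== PORT B =====
-- the while-loop of Source B: index of the first body line, state = in_docstring only
def bBoundary : List String → Bool → Nat
  | [], _ => 0
  | line :: rest, in_docstring =>
    if in_docstring then
      1 + bBoundary rest (if pyOddTriple line then false else in_docstring)
    else
      let stripped := PySem.Str.strip line
      let opens := PySem.Str.startswith stripped "\"\"\"" || PySem.Str.startswith stripped "'''"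
      if PySem.Str.startswith stripped "import " || PySem.Str.startswith stripped "from "
          || stripped == "" || PySem.Str.startswith stripped "#" || opens then
        1 + bBoundary rest (if opens && pyOddTriple line then true else in_docstring)
      else
        0

def split_imports_and_body_py_alt (src : String) : List String × String :=
  let lines := PySem.Str.splitlines src
  let i := bBoundary lines false
  (lines.take i, PySem.Str.join "\n" (lines.drop i))

-- ===== PRECONDITION & SPEC =====
def Spec_split_imports_and_body_py (src : String) (out : List String × String) : Prop := out = split_imports_and_body_py_alt src
instance (src : String) (out : List String × String) : Decidable (Spec_split_imports_and_body_py src out) := by unfold Spec_split_imports_and_body_py; infer_instance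

-- ===== CLAIM (what is proved, stated in full; the proofs are below) =====
def Claim_equal_split_imports_and_body_py : Prop := ∀ (src : String), Dom_split_imports_and_body_py src → Spec_split_imports_and_body_py src (split_imports_and_body_py src)

-- ===== LEMMAS AND PROOFS =====

-- once in_imports is false (and no docstring is open), every line goes to body_lines
theorem aLoop_body (lines : List String) : ∀ (imp body : List String),
    aLoop lines imp body false false = (imp, body ++ lines) := by
  induction lines with
  | nil => intro imp body; simp [aLoop]
  | cons line rest ih =>
    intro imp body
    simp only [aLoop, if_neg (by simp : ¬ (false = true))]
    rw [ih]
    simp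

-- while in_imports, A's accumulators are exactly B's take/drop at the boundary
theorem aLoop_eq_boundary (lines : List String) : ∀ (imp body : List String) (d : Bool),
    aLoop lines imp body true d =
      (imp ++ lines.take (bBoundary lines d), body ++ lines.drop (bBoundary lines d)) := by
  induction lines with
  | nil => intro imp body d; simp [aLoop, bBoundary]
  | cons line rest ih =>
    intro imp body d
    by_cases hd : d = true
    · subst hd
      simp only [aLoop, bBoundary, if_pos rfl]
      rw [ih]
      simp [Nat.one_add]
    · replace hd : d = false := by cases d <;> simp_all
      subst hd
      simp only [aLoop, bBoundary]
      split_ifs with h1 h2 <;> try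
        (first
          | (rw [ih]; simp [Nat.one_add])
          | (rw [aLoop_body]; simp))

-- ===== VERDICT (by name: the statement is the Claim_ definition above) =====
theorem split_imports_and_body_py_spec : Claim_equal_split_imports_and_body_py := by
  intro src _
  unfold Spec_split_imports_and_body_py split_imports_and_body_py split_imports_and_body_py_alt
  rw [aLoop_eq_boundary]
  simp
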